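-- pv_equiv track=rewrite | github.com/Meeperbunny/ProjectEuler | scripts/358.py | last_digits
-- ===== SOURCE A (Python) =====
-- def last_digits(p):
--     b = 1
--     digits = []
--     for i in range(p - 1):
--         b *= 10
--         c = b // p
--         digits.append(c)
--         b -= c * p
--     return digits
-- ===== SOURCE B (Python) =====
-- def last_digits(p):
--     # Each digit computed independently from the modular power: the remainder
--     # entering step i is 10**i mod p, so digit i = (10 * pow(10, i, p)) // p.
--     return [(10 * pow(10, i, p)) // p for i in range(p - 1)]
-- ===== Notes on version B (the rewrite author's own statement) =====
-- stated objective: alternative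
-- what changed: Replaces the loop that threads a running remainder b through the iterations by a comprehension computing each digit independently as (10*pow(10,i,p))//p, using that the carried remainder before step i equals 10^i mod p.
import Mathlib
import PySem

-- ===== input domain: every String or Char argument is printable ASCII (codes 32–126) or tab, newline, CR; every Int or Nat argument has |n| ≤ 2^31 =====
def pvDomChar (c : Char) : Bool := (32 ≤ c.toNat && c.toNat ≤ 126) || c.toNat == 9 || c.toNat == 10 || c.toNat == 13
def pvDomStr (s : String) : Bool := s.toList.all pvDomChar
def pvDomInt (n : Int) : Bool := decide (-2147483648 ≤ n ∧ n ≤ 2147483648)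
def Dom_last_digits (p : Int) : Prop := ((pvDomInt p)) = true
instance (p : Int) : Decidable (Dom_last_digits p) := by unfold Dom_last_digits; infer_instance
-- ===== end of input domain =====

-- B computes each digit independently from the modular power 10^i mod p instead of
-- threading the running remainder through the loop (alternative decomposition).

-- ===== PORT A =====
def last_digits (p : Int) : List Int :=
  ((PySem.List.pyRange 0 (p - 1) 1).foldl
    (fun (st : Int × List Int) (_i : Int) =>
      let b := st.1 * 10
      let c := PySem.Int.floordiv b p
      (b - c * p, st.2 ++ [c]))
    (1, [])).2

-- ===== PORT B =====
def last_digits_alt (p : Int) : List Int :=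
  (PySem.List.pyRange 0 (p - 1) 1).map
    (fun i => PySem.Int.floordiv (10 * PySem.Int.powMod 10 i.toNat p) p)

-- ===== PRECONDITION & SPEC =====
def Spec_last_digits (p : Int) (out : List Int) : Prop := out = last_digits_alt p
instance (p : Int) (out : List Int) : Decidable (Spec_last_digits p out) := by unfold Spec_last_digits; infer_instance

-- ===== CLAIM (what is proved, stated in full; the proofs are below) =====
def Claim_equal_last_digits : Prop := ∀ (p : Int), Dom_last_digits p → Spec_last_digits p (last_digits p)

-- ===== LEMMAS AND PROOFS =====

theorem pv_fmod_eq_emod (a p : Int) (hp : 0 ≤ p) : a.fmod p = a % p := by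
  rw [Int.fmod_eq_emod]
  simp [hp]

-- loop invariant: after k iterations, the carried remainder is 10^k mod p and the
-- accumulated digits are exactly B's first k digits
theorem pv_loop_inv (p : Int) (hp : 2 ≤ p) (k : Nat) :
    ((PySem.List.pyRange 0 (k : Int) 1).foldl
      (fun (st : Int × List Int) (_i : Int) =>
        let b := st.1 * 10
        let c := PySem.Int.floordiv b p
        (b - c * p, st.2 ++ [c]))
      (1, [])) =
    ((10 ^ k : Int) % p,
     (PySem.List.pyRange 0 (k : Int) 1).map
       (fun i => PySem.Int.floordiv (10 * PySem.Int.powMod 10 i.toNat p) p)) := by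
  induction k with
  | zero =>
      simp [PySem.List.pyRange_one_eq_nil]
      rw [Int.emod_eq_of_lt (by norm_num) (by omega)]
  | succ k ih =>
      have hk : (0 : Int) ≤ (k : Int) := by positivity
      have hstep : (PySem.List.pyRange 0 ((k : Int) + 1) 1)
          = PySem.List.pyRange 0 (k : Int) 1 ++ [(k : Int)] :=
        PySem.List.pyRange_one_succ_right hk
      have hp0 : (0 : Int) ≤ p := by omega
      push_cast
      rw [hstep, List.foldl_append, List.map_append, ih]
      simp only [List.foldl_cons, List.foldl_nil, List.map_cons, List.map_nil,
        Prod.mk.injEq, List.append_cancel_left_eq, List.cons.injEq, and_true]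
      refine ⟨?_, ?_⟩
      · -- new remainder: (10^k % p) * 10 - c*p = 10^(k+1) % p
        show (10 ^ k % p) * 10 - PySem.Int.floordiv ((10 ^ k % p) * 10) p * p
            = 10 ^ (k + 1) % p
        have hd : PySem.Int.floordiv ((10 ^ k % p) * 10) p * p
            = (10 ^ k % p) * 10 - ((10 ^ k % p) * 10).fmod p := by
          rw [Int.fmod_def, PySem.Int.floordiv]; ring
        rw [hd, pv_fmod_eq_emod _ _ hp0]
        have : ((10 ^ k % p) * 10) % p = 10 ^ (k + 1) % p := by
          rw [pow_succ]
          conv_rhs => rw [Int.mul_emod]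
          rw [Int.mul_emod, Int.emod_emod_of_dvd _ (dvd_refl p)]
        omega
      · -- new digit: c = B's digit at index k
        show PySem.Int.floordiv ((10 ^ k % p) * 10) p
            = PySem.Int.floordiv (10 * PySem.Int.powMod 10 (Int.toNat (k : Int)) p) p
        have : PySem.Int.powMod 10 (Int.toNat (k : Int)) p = (10 : Int) ^ k % p := by
          simp [PySem.Int.powMod, PySem.Int.mod] at *
          rw [pv_fmod_eq_emod _ _ hp0]
        rw [this, mul_comm]

-- ===== VERDICT (by name: the statement is the Claim_ definition above) =====
theorem last_digits_spec : Claim_equal_last_digits := by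
  intro p _
  unfold Spec_last_digits last_digits last_digits_alt
  by_cases hp : p ≤ 1
  · rw [PySem.List.pyRange_one_eq_nil (by omega)]
    simp
  · have hp2 : 2 ≤ p := by omega
    have hk : p - 1 = ((p - 1).toNat : Int) := by omega
    rw [hk, pv_loop_inv p hp2]
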